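-- pv_equiv track=rewrite | github.com/user04f8/genetic-tensor-ops | shape_utils.py | can_reduce
-- ===== SOURCE A (Python) =====
-- def can_reduce(input_shape, output_shape):
--     # Check if output_shape is a reduced form of input_shape by removing or reducing some dims
--     # A simple heuristic: output_shape must be <= input_shape in rank and each dimension matches
--     # except for reduced ones.
--     # For simplicity, assume output_shape is a strict subset of input_shape with some dims summed out.
--     if len(output_shape) <= len(input_shape):
--         # We must find a sequence of sums that turn input_shape into output_shape
--         # For simplicity, let's require output_shape be exactly input_shape with some dims removed.
--         # More complex logic could be implemented.
--         # Check if output_shape can be obtained by removing some dimensions of size > 1 from input_shape.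
--         # Not perfect, but works as an example.
--         # If output_shape == input_shape, it's also valid if we sum over a dimension of size 1.
--         # We'll just allow equality as trivial no-op sum or sum over dim of size=1.
--         if output_shape == input_shape:
--             return True
--         # Try to see if output_shape is input_shape with one dimension removed:
--         # This is a simplified assumption.
--         for dim in range(len(input_shape)):
--             # Remove dim
--             reduced = input_shape[:dim] + input_shape[dim+1:]
--             if reduced == output_shape:
--                 return True
--     return False
-- ===== SOURCE B (Python) =====
-- def can_reduce(input_shape, output_shape):
--     li, lo = len(input_shape), len(output_shape)
--     if li == lo:
--         return input_shape == output_shape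
--     if lo != li - 1:
--         return False
--     # two-pointer scan: advance while heads match, then skip one element of
--     # input_shape and require the remainders to be identical
--     i = 0
--     while i < lo and input_shape[i] == output_shape[i]:
--         i += 1
--     return input_shape[i + 1:] == output_shape[i:]
-- ===== Notes on version B (the rewrite author's own statement) =====
-- stated objective: faster
-- what changed: Replaces the rebuild-each-candidate loop (one slice+concat+compare per dimension) with a length dispatch and a single two-pointer scan that skips input_shape at the first mismatch.
import Mathlib
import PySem

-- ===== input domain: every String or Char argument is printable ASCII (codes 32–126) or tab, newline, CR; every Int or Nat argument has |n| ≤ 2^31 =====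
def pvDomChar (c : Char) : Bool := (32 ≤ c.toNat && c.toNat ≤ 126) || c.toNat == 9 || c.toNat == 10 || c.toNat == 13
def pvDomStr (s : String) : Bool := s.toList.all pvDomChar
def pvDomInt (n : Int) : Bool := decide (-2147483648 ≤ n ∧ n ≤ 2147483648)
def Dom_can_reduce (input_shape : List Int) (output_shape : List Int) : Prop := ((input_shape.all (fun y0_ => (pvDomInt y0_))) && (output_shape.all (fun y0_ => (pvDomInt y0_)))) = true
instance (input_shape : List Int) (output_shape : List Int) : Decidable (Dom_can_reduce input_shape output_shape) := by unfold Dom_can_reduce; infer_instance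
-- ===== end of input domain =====

-- B replaces A's per-dimension rebuild-and-compare loop with a length dispatch and one
-- two-pointer scan (objective: faster, O(n) instead of O(n^2)).

-- ===== PORT A =====
-- the 'for dim in range(len(input_shape))' loop with its early 'return True'
def canReduceLoop (input_shape : List Int) (output_shape : List Int) : List Int → Bool
  | [] => false
  | dim :: rest =>
    if (PySem.List.slice input_shape none (some dim) ++
        PySem.List.slice input_shape (some (dim + 1)) none) = output_shape then true
    else canReduceLoop input_shape output_shape rest

def can_reduce (input_shape : List Int) (output_shape : List Int) : Bool :=
  if output_shape.length ≤ input_shape.length then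
    if output_shape = input_shape then true
    else canReduceLoop input_shape output_shape
           (PySem.List.pyRange 0 (input_shape.length : Int) 1)
  else false

-- ===== PORT B =====
-- Source B's while loop + final slice comparison: advance while heads match; at the first
-- mismatch (or when output is exhausted) skip one element of input and compare the rests
def bScan : List Int → List Int → Bool
  | xs, [] => decide (xs.drop 1 = [])
  | [], _ :: _ => false   -- unreachable under the length guard below
  | x :: xs, y :: ys => if x = y then bScan xs ys else decide (xs = y :: ys)

def can_reduce_alt (input_shape : List Int) (output_shape : List Int) : Bool :=
  if input_shape.length = output_shape.length then decide (input_shape = output_shape)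
  else if output_shape.length + 1 = input_shape.length then bScan input_shape output_shape
  else false

-- ===== PRECONDITION & SPEC =====
def Spec_can_reduce (input_shape : List Int) (output_shape : List Int) (out : Bool) : Prop := out = can_reduce_alt input_shape output_shape
instance (input_shape : List Int) (output_shape : List Int) (out : Bool) : Decidable (Spec_can_reduce input_shape output_shape out) := by unfold Spec_can_reduce; infer_instance

-- ===== CLAIM (what is proved, stated in full; the proofs are below) =====
def Claim_equal_can_reduce : Prop := ∀ (input_shape : List Int) (output_shape : List Int), Dom_can_reduce input_shape output_shape → Spec_can_reduce input_shape output_shape (can_reduce input_shape output_shape)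

-- ===== LEMMAS AND PROOFS =====

-- A's loop succeeds iff some listed dim gives output_shape
theorem canReduceLoop_iff (i o : List Int) (dims : List Int) :
    canReduceLoop i o dims = true ↔
      ∃ d ∈ dims, (PySem.List.slice i none (some d) ++ PySem.List.slice i (some (d + 1)) none) = o := by
  induction dims with
  | nil => simp [canReduceLoop]
  | cons d rest ih =>
    simp only [canReduceLoop]
    split_ifs with h
    · simp [h]
    · simp [ih, h]

-- A's loop over range(len i) tests exactly the one-dim removals
theorem canReduceLoop_range_iff (i o : List Int) :
    canReduceLoop i o (PySem.List.pyRange 0 (i.length : Int) 1) = true ↔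
      ∃ k < i.length, i.take k ++ i.drop (k + 1) = o := by
  rw [canReduceLoop_iff]
  constructor
  · rintro ⟨d, hd, heq⟩
    rw [PySem.List.mem_pyRange_one] at hd
    obtain ⟨hd0, hdn⟩ := hd
    refine ⟨d.toNat, by omega, ?_⟩
    have hdc : d = (d.toNat : Int) := by omega
    rw [hdc] at heq
    rw [PySem.List.slice_to_natCast] at heq
    have : ((d.toNat : Int) + 1) = ((d.toNat + 1 : Nat) : Int) := by push_cast; ring
    rw [this, PySem.List.slice_from_natCast] at heq
    exact heq
  · rintro ⟨k, hk, heq⟩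
    refine ⟨(k : Int), by rw [PySem.List.mem_pyRange_one]; omega, ?_⟩
    rw [PySem.List.slice_to_natCast]
    have : ((k : Int) + 1) = ((k + 1 : Nat) : Int) := by push_cast; ring
    rw [this, PySem.List.slice_from_natCast]
    exact heq

-- length of a one-dim removal
theorem removal_length (i : List Int) (k : Nat) (hk : k < i.length) :
    (i.take k ++ i.drop (k + 1)).length = i.length - 1 := by
  simp [List.length_take, List.length_drop]
  omega

-- B's scan decides existence of a one-dim removal, given the length relation
theorem bScan_iff (xs : List Int) : ∀ ys : List Int, xs.length = ys.length + 1 →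
    (bScan xs ys = true ↔ ∃ k < xs.length, xs.take k ++ xs.drop (k + 1) = ys) := by
  induction xs with
  | nil => intro ys h; simp at h
  | cons x xs ih =>
    intro ys hlen
    cases ys with
    | nil =>
      have : xs = [] := by
        cases xs with
        | nil => rfl
        | cons a t => simp at hlen
      subst this
      simp [bScan]
    | cons y ys =>
      simp only [bScan]
      by_cases hxy : x = y
      · subst hxy
        simp only [if_true]
        rw [ih ys (by simpa using hlen)]
        constructor
        · rintro ⟨k, hk, heq⟩
          exact ⟨k + 1, by simp; omega, by simp [heq]⟩
        · rintro ⟨k, hk, heq⟩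
          cases k with
          | zero =>
            simp at heq
            -- xs = x :: ys : removing xs's head also works
            exact ⟨0, by simp [heq], by simp [heq]⟩
          | succ k =>
            simp [List.take_succ_cons, List.drop_succ_cons] at heq
            exact ⟨k, by simp at hk; omega, heq⟩
      · rw [if_neg hxy]
        simp only [decide_eq_true_eq]
        constructor
        · intro h
          exact ⟨0, by simp, by simpa using h⟩
        · rintro ⟨k, hk, heq⟩
          cases k with
          | zero => simpa using heq
          | succ k =>
            simp [List.take_succ_cons, List.drop_succ_cons] at heq
            exact absurd heq.1 hxy

-- ===== VERDICT (by name: the statement is the Claim_ definition above) =====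
theorem can_reduce_spec : Claim_equal_can_reduce := by
  intro i o _
  unfold Spec_can_reduce can_reduce can_reduce_alt
  by_cases heq : i.length = o.length
  · rw [if_pos heq, if_pos (by omega)]
    by_cases hoi : o = i
    · simp [hoi]
    · rw [if_neg hoi]
      have hne : i ≠ o := fun h => hoi h.symm
      rw [decide_eq_false hne]
      by_cases hF : canReduceLoop i o (PySem.List.pyRange 0 (i.length : Int) 1) = true
      · rw [canReduceLoop_range_iff] at hF
        obtain ⟨k, hk, hrm⟩ := hF
        have := removal_length i k hk
        rw [hrm] at this
        omega
      · simpa using hF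
  · rw [if_neg heq]
    by_cases hle : o.length ≤ i.length
    · rw [if_pos hle]
      have hoi : o ≠ i := by intro h; subst h; exact heq rfl
      rw [if_neg hoi]
      by_cases hone : o.length + 1 = i.length
      · rw [if_pos hone]
        have hiff : bScan i o = true ↔
            canReduceLoop i o (PySem.List.pyRange 0 (i.length : Int) 1) = true := by
          rw [bScan_iff i o (by omega), canReduceLoop_range_iff]
        cases hb : bScan i o <;>
          cases hc : canReduceLoop i o (PySem.List.pyRange 0 (i.length : Int) 1) <;> simp_all
      · rw [if_neg hone]
        by_cases hA : canReduceLoop i o (PySem.List.pyRange 0 (i.length : Int) 1) = true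
        · rw [canReduceLoop_range_iff] at hA
          obtain ⟨k, hk, hrm⟩ := hA
          have := removal_length i k hk
          rw [hrm] at this
          omega
        · simpa using hA
    · rw [if_neg hle, if_neg (by omega)]
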